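-- pv_equiv track=rewrite | github.com/ghensley1098/Zero-Divisor-Graph-Catalog | catalog.py | get_ann_of_set
-- ===== SOURCE A (Python) =====
-- def get_ann(x, n, zero_divisors):
--     """
--     Calculates ann(x) for a given x in Z_n.
--     ann(x) is the set of all y such that (x, y) is a zero divisor pair.
--     """
--     ann_x = set()
--     for a, b in zero_divisors:
--         if a == x:
--             ann_x.add(b)
--     return ann_x
--
-- def get_ann_of_set(s, n, zero_divisors):
--     """
--     Calculates ann({x, y, z, ...}) for a given set in Z_n.
--     This is the intersection of ann(i) for all i in the set.
--     """
--     if not s: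
--         return set(range(n))
--
--     ann_sets = [get_ann(i, n, zero_divisors) for i in s]
--
--     intersection = ann_sets[0]
--     for i in range(1, len(ann_sets)):
--         intersection = intersection.intersection(ann_sets[i])
--
--     return intersection
-- ===== SOURCE B (Python) =====
-- def get_ann_of_set(s, n, zero_divisors):
--     if not s:
--         return set(range(n))
--     ann = {}
--     for a, b in zero_divisors:
--         ann.setdefault(a, set()).add(b)
--     it = iter(s)
--     result = ann.get(next(it), set())
--     for x in it:
--         result = result & ann.get(x, set())
--     return result
-- ===== Notes on version B (the rewrite author's own statement) =====
-- stated objective: faster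
-- what changed: Instead of scanning the whole zero_divisors list once per element of s, B builds a dict mapping each first component to the set of its partners in one pass, then intersects dict lookups over s.
import Mathlib
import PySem

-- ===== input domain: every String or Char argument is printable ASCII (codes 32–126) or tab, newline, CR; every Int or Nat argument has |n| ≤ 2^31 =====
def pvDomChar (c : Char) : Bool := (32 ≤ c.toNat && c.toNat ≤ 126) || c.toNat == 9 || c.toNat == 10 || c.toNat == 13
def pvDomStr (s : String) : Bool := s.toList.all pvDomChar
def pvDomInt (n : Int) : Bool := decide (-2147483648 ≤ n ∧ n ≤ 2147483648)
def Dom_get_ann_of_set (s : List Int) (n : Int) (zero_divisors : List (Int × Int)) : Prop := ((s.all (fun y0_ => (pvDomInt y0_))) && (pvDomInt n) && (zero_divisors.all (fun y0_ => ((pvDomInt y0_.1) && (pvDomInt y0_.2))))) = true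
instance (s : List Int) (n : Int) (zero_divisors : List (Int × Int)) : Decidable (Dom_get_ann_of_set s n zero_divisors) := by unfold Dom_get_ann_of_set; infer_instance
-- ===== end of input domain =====

-- B replaces A's per-element rescans of zero_divisors by one grouping pass into a dict, then lookups; objective: faster (asymptotic).
-- ===== PORT A =====
def get_ann (x : Int) (n : Int) (zero_divisors : List (Int × Int)) : List Int :=
  zero_divisors.foldl
    (fun ann_x p => if p.1 == x then PySem.Set.add ann_x p.2 else ann_x)
    PySem.Set.empty

def get_ann_of_set (s : List Int) (n : Int) (zero_divisors : List (Int × Int)) : List Int :=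
  if s = [] then PySem.Set.ofList (PySem.List.pyRange 0 n 1)
  else
    let ann_sets := s.map (fun i => get_ann i n zero_divisors)
    (PySem.List.pyRange 1 (ann_sets.length : Int) 1).foldl
      (fun inter i => PySem.Set.inter inter (PySem.List.pyGetD ann_sets i []))
      (PySem.List.pyGetD ann_sets 0 [])

-- ===== PORT B =====
def get_ann_of_set_alt (s : List Int) (n : Int) (zero_divisors : List (Int × Int)) : List Int :=
  match s with
  | [] => PySem.Set.ofList (PySem.List.pyRange 0 n 1)
  | x :: rest =>
    let ann : PySem.Dict Int (List Int) :=
      zero_divisors.foldl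
        (fun d p => PySem.Dict.modify d p.1 PySem.Set.empty (fun v => PySem.Set.add v p.2))
        PySem.Dict.empty
    rest.foldl
      (fun r y => PySem.Set.inter r (PySem.Dict.getD ann y PySem.Set.empty))
      (PySem.Dict.getD ann x PySem.Set.empty)

-- ===== PRECONDITION & SPEC =====
def Spec_get_ann_of_set (s : List Int) (n : Int) (zero_divisors : List (Int × Int)) (out : List Int) : Prop := out = get_ann_of_set_alt s n zero_divisors
instance (s : List Int) (n : Int) (zero_divisors : List (Int × Int)) (out : List Int) : Decidable (Spec_get_ann_of_set s n zero_divisors out) := by unfold Spec_get_ann_of_set; infer_instance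

-- ===== CLAIM (what is proved, stated in full; the proofs are below) =====
def Claim_equal_get_ann_of_set : Prop := ∀ (s : List Int) (n : Int) (zero_divisors : List (Int × Int)), Dom_get_ann_of_set s n zero_divisors → Spec_get_ann_of_set s n zero_divisors (get_ann_of_set s n zero_divisors)

-- ===== LEMMAS AND PROOFS =====

-- the grouping dict's lookup at x is exactly A's get_ann x
theorem getD_group (zd : List (Int × Int)) (x : Int) (d : PySem.Dict Int (List Int)) :
    PySem.Dict.getD
      (zd.foldl (fun d p => PySem.Dict.modify d p.1 PySem.Set.empty (fun v => PySem.Set.add v p.2)) d)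
      x PySem.Set.empty
    = zd.foldl (fun ann_x p => if p.1 == x then PySem.Set.add ann_x p.2 else ann_x)
        (PySem.Dict.getD d x PySem.Set.empty) := by
  induction zd generalizing d with
  | nil => rfl
  | cons p rest ih =>
    simp only [List.foldl_cons, ih]
    congr 1
    rw [PySem.Dict.getD_modify]
    by_cases h : p.1 = x
    · simp [h]
    · simp [h, Ne.symm h]

theorem getD_group_empty (zd : List (Int × Int)) (x : Int) (nn : Int) :
    PySem.Dict.getD
      (zd.foldl (fun d p => PySem.Dict.modify d p.1 PySem.Set.empty (fun v => PySem.Set.add v p.2)) PySem.Dict.empty)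
      x PySem.Set.empty = get_ann x nn zd := by
  rw [getD_group]; rfl

-- A's indexed fold over range(1, len) equals the direct fold over the tail
theorem foldl_range_inter (g : Int → List Int) (x : Int) (rest : List Int) :
    (PySem.List.pyRange 1 (((x :: rest).map g).length : Int) 1).foldl
      (fun inter i => PySem.Set.inter inter (PySem.List.pyGetD ((x :: rest).map g) i []))
      (PySem.List.pyGetD ((x :: rest).map g) 0 [])
    = rest.foldl (fun r y => PySem.Set.inter r (g y)) (g x) := by
  rw [PySem.List.foldl_pyRange_pyGetD' ((x :: rest).map g) ([] : List Int)
      (fun acc v => PySem.Set.inter acc v) (PySem.List.pyGetD ((x :: rest).map g) 0 [])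
      (by norm_num : (0 : Int) ≤ 1)]
  simp [PySem.List.pyGetD_zero_cons, List.foldl_map]

-- ===== VERDICT (by name: the statement is the Claim_ definition above) =====
theorem get_ann_of_set_spec : Claim_equal_get_ann_of_set := by
  intro s n zd _
  unfold Spec_get_ann_of_set get_ann_of_set get_ann_of_set_alt
  cases s with
  | nil => simp
  | cons x rest =>
    simp only [if_neg (List.cons_ne_nil x rest)]
    rw [foldl_range_inter (fun i => get_ann i n zd) x rest]
    simp only [getD_group_empty zd _ n]
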